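-- pv_equiv track=rewrite | github.com/pypi-data/pypi-mirror-268 | packages/sedeuce/sedeuce-1.0.9.tar.gz/sedeuce-1.0.9/src/sedeuce/utils.py | count_end_escapes
-- ===== SOURCE A (Python) =====
-- def count_end_escapes(s:str):
--     count = 0
--     for c in reversed(s):
--         if c == '\\':
--             count += 1
--         else:
--             break
--     return count
-- ===== SOURCE B (Python) =====
-- def count_end_escapes(s: str):
--     return len(s) - len(s.rstrip('\\'))
-- ===== Notes on version B (the rewrite author's own statement) =====
-- stated objective: simpler
-- what changed: Replaces the explicit reverse loop with accumulator and break by a single length difference: length of s minus the length of s with its trailing backslash run stripped by str.rstrip.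
import Mathlib
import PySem

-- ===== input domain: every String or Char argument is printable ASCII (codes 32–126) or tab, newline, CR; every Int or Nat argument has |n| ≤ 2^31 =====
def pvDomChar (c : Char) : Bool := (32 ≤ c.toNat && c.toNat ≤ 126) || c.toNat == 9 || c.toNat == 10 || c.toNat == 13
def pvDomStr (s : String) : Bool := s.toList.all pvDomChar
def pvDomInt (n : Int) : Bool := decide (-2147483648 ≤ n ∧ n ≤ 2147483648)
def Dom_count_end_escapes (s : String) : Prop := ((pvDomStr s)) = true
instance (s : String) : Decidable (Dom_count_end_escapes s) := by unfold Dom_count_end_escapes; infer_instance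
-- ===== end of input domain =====

-- B replaces A's reverse loop with accumulator and break by a length difference
-- len(s) - len(s.rstrip('\\')) — simpler, same exact behaviour.

-- ===== PORT A =====
-- the loop 'for c in reversed(s): if c == '\\': count += 1 else: break'
def countEndEscapesLoop (count : Int) : List Char → Int
  | [] => count
  | c :: rest => if c = '\\' then countEndEscapesLoop (count + 1) rest else count

def count_end_escapes (s : String) : Int :=
  countEndEscapesLoop 0 s.toList.reverse

-- ===== PORT B =====
-- s.rstrip('\\') ported by hand (PySem has no chars-argument rstrip): drop the
-- trailing run of characters from the given set; exact for Python's str.rstrip(chars).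
def pyRstripChars (s : List Char) (chars : List Char) : List Char :=
  (s.reverse.dropWhile (fun c => chars.contains c)).reverse

def count_end_escapes_alt (s : String) : Int :=
  (s.toList.length : Int) - (pyRstripChars s.toList ['\\']).length

-- ===== PRECONDITION & SPEC =====
def Spec_count_end_escapes (s : String) (out : Int) : Prop := out = count_end_escapes_alt s
instance (s : String) (out : Int) : Decidable (Spec_count_end_escapes s out) := by unfold Spec_count_end_escapes; infer_instance

-- ===== CLAIM (what is proved, stated in full; the proofs are below) =====
def Claim_equal_count_end_escapes : Prop := ∀ (s : String), Dom_count_end_escapes s → Spec_count_end_escapes s (count_end_escapes s)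

-- ===== LEMMAS AND PROOFS =====
theorem countEndEscapesLoop_eq (count : Int) (l : List Char) :
    countEndEscapesLoop count l = count + (l.takeWhile (fun c => c = '\\')).length := by
  induction l generalizing count with
  | nil => simp [countEndEscapesLoop]
  | cons c rest ih =>
    by_cases h : c = '\\'
    · simp [countEndEscapesLoop, h, ih]; ring
    · simp [countEndEscapesLoop, h]

-- ===== VERDICT (by name: the statement is the Claim_ definition above) =====
theorem count_end_escapes_spec : Claim_equal_count_end_escapes := by
  intro s _
  show count_end_escapes s = count_end_escapes_alt s
  unfold count_end_escapes count_end_escapes_alt pyRstripChars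
  rw [countEndEscapesLoop_eq]
  have hlen : (s.toList.reverse.takeWhile (fun c => ([ '\\' ] : List Char).contains c)).length
      + (s.toList.reverse.dropWhile (fun c => ([ '\\' ] : List Char).contains c)).length
      = s.toList.length := by
    conv_rhs => rw [← List.length_reverse (as := s.toList),
      ← List.takeWhile_append_dropWhile (p := fun c => ([ '\\' ] : List Char).contains c)
        (l := s.toList.reverse)]
    exact (List.length_append).symm
  have hp : (fun c => decide (c = '\\')) = (fun c => ([ '\\' ] : List Char).contains c) := by
    funext c; simp
  rw [List.length_reverse, hp]
  omega
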